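-- pv_equiv track=rewrite | github.com/dev-lu/osint_toolkit | backend/app/features/ioc_tools/ioc_defanger/service/defang_service.py | get_ioc_types_from_extraction
-- ===== SOURCE A (Python) =====
-- from typing import List, Dict, Any
--
-- def get_ioc_types_from_extraction(extracted_data: Dict[str, Any]) -> Dict[str, List[str]]:
--     """
--     Create a mapping of IOC values to their types from extraction data
--
--     Args:
--         extracted_data: Data returned from extract_iocs
--
--     Returns:
--         Dictionary mapping IOC values to their types
--     """
--     ioc_type_map = {}
--
--     type_mapping = {
--         'ips': 'IP Address',
--         'md5': 'MD5 Hash',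
--         'sha1': 'SHA1 Hash',
--         'sha256': 'SHA256 Hash',
--         'urls': 'URL',
--         'domains': 'Domain',
--         'emails': 'Email',
--         'cves': 'CVE'
--     }
--
--     # Extract all IOCs with their types
--     for key, values in extracted_data.items():
--         if isinstance(values, list) and key in type_mapping:
--             for ioc in values:
--                 if ioc not in ioc_type_map:
--                     ioc_type_map[ioc] = []
--                 if type_mapping[key] not in ioc_type_map[ioc]:
--                     ioc_type_map[ioc].append(type_mapping[key])
--
--     return ioc_type_map
-- ===== SOURCE B (Python) =====
-- def get_ioc_types_from_extraction(extracted_data):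
--     """Transposed, non-incremental rewrite: instead of growing a dict of type
--     lists IOC by IOC with an inline membership dedup (as A does), materialise
--     the relevant (type, values, value-set) columns once, compute the row order
--     as the first-appearance order of IOCs, and then compute each IOC's type
--     list directly as one scan across the columns testing set membership.
--     Correct because dict keys are unique and the type mapping is injective, so
--     an IOC's final type list in A is exactly the columns (in input order) whose
--     value list contains it."""
--     type_mapping = {
--         'ips': 'IP Address',
--         'md5': 'MD5 Hash',
--         'sha1': 'SHA1 Hash',
--         'sha256': 'SHA256 Hash',
--         'urls': 'URL',
--         'domains': 'Domain',
--         'emails': 'Email',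
--         'cves': 'CVE'
--     }
--     columns = [(type_mapping[k], vs, set(vs))
--                for k, vs in extracted_data.items()
--                if isinstance(vs, list) and k in type_mapping]
--     order = dict.fromkeys(ioc for _, vs, _ in columns for ioc in vs)
--     return {ioc: [t for t, _, s in columns if ioc in s] for ioc in order}
-- ===== Notes on version B (the rewrite author's own statement) =====
-- stated objective: alternative
-- what changed: A grows a dict of type lists incrementally per IOC with an inline membership dedup; B never builds lists incrementally: it materialises the relevant (type, values, set) columns once, derives the IOC row order by first appearance, and computes each IOC's type list in one scan across the columns via set membership (a transposed, rank/row computation instead of an accumulating dict).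
import Mathlib
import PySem

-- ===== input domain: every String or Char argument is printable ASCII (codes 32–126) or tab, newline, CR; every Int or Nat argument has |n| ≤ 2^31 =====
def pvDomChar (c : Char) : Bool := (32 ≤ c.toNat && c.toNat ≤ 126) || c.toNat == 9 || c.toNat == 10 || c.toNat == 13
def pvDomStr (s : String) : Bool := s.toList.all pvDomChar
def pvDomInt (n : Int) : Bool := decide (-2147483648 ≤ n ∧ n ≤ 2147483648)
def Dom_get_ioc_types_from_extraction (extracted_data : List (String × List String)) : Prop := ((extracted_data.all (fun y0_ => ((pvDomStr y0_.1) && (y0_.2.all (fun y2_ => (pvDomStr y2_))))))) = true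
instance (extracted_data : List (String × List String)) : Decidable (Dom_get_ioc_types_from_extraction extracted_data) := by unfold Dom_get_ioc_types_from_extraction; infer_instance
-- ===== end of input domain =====

-- B replaces A's incremental dict-of-lists build (inline membership dedup per IOC) by a
-- transposed computation: materialise the relevant (type, values, set) columns once, take the
-- IOC row order by first appearance, and compute each IOC's type list by one scan across the
-- columns (objective: alternative algorithm, same cost).

-- ===== PORT A =====
-- the type_mapping dict literal (distinct keys, insertion order)
def pvTypeMapping : PySem.Dict String String :=
  PySem.Dict.mk [("ips", "IP Address"), ("md5", "MD5 Hash"), ("sha1", "SHA1 Hash"),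
    ("sha256", "SHA256 Hash"), ("urls", "URL"), ("domains", "Domain"),
    ("emails", "Email"), ("cves", "CVE")]

-- literal port of A; 'isinstance(values, list)' is always true under the typed domain
def get_ioc_types_from_extraction (extracted_data : List (String × List String)) : List (String × List String) :=
  let ioc_type_map :=
    extracted_data.foldl (fun m kv =>
      if pvTypeMapping.contains kv.1 then
        kv.2.foldl (fun m ioc =>
          let m1 := if m.contains ioc then m else m.insert ioc ([] : List String)
          if pvTypeMapping.getD kv.1 "" ∈ m1.getD ioc [] then m1
          else m1.modify ioc [] (fun l => l ++ [pvTypeMapping.getD kv.1 ""])) m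
      else m) PySem.Dict.empty
  ioc_type_map.items

-- ===== PORT B =====
-- literal port of Source B: build the relevant columns, the first-appearance IOC order, then the
-- result dict comprehension (one insert per distinct IOC, type list by a scan over the columns)
def get_ioc_types_from_extraction_alt (extracted_data : List (String × List String)) : List (String × List String) :=
  let columns := (extracted_data.filter (fun kv => pvTypeMapping.contains kv.1)).map
      (fun kv => (pvTypeMapping.getD kv.1 "", kv.2, PySem.Set.ofList kv.2))
  let order := PySem.List.dedup (columns.flatMap (fun c => c.2.1))
  (order.foldl (fun d ioc =>
      d.insert ioc ((columns.filter (fun c => c.2.2.contains ioc)).map (fun c => c.1)))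
    PySem.Dict.empty).items

-- ===== PRECONDITION & SPEC =====
-- Pre_ excludes association lists with duplicate keys: the Python argument is a dict, whose
-- keys are necessarily distinct, so such lists correspond to no actual Python input.
def Pre_get_ioc_types_from_extraction (extracted_data : List (String × List String)) : Prop :=
  (extracted_data.map Prod.fst).Nodup
instance (extracted_data : List (String × List String)) : Decidable (Pre_get_ioc_types_from_extraction extracted_data) := by unfold Pre_get_ioc_types_from_extraction; infer_instance

def pvWitness_get_ioc_types_from_extraction : (List (String × List String)) :=
  [("ips", ["1.2.3.4", "1.2.3.4"]), ("domains", ["x.com", "1.2.3.4"]), ("junk", ["z"])]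

def Spec_get_ioc_types_from_extraction (extracted_data : List (String × List String)) (out : List (String × List String)) : Prop := out = get_ioc_types_from_extraction_alt extracted_data
instance (extracted_data : List (String × List String)) (out : List (String × List String)) : Decidable (Spec_get_ioc_types_from_extraction extracted_data out) := by unfold Spec_get_ioc_types_from_extraction; infer_instance

-- ===== CLAIM (what is proved, stated in full; the proofs are below) =====
def Claim_equal_get_ioc_types_from_extraction : Prop := ∀ (extracted_data : List (String × List String)), Dom_get_ioc_types_from_extraction extracted_data → Pre_get_ioc_types_from_extraction extracted_data → Spec_get_ioc_types_from_extraction extracted_data (get_ioc_types_from_extraction extracted_data)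

-- ===== LEMMAS AND PROOFS =====

-- the type mapping sends distinct present keys to distinct type names
set_option maxRecDepth 4096 in
theorem pvGetD_injOn (x y : String)
    (hx : pvTypeMapping.contains x = true) (hy : pvTypeMapping.contains y = true)
    (heq : pvTypeMapping.getD x "" = pvTypeMapping.getD y "") : x = y := by
  have hx' : "ips" = x ∨ "md5" = x ∨ "sha1" = x ∨ "sha256" = x ∨ "urls" = x ∨
      "domains" = x ∨ "emails" = x ∨ "cves" = x := by
    simpa [pvTypeMapping, PySem.Dict.contains, PySem.Dict.items, List.any_cons] using hx
  have hy' : "ips" = y ∨ "md5" = y ∨ "sha1" = y ∨ "sha256" = y ∨ "urls" = y ∨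
      "domains" = y ∨ "emails" = y ∨ "cves" = y := by
    simpa [pvTypeMapping, PySem.Dict.contains, PySem.Dict.items, List.any_cons] using hy
  rcases hx' with rfl | rfl | rfl | rfl | rfl | rfl | rfl | rfl <;>
    rcases hy' with rfl | rfl | rfl | rfl | rfl | rfl | rfl | rfl <;>
      first
        | rfl
        | (exfalso; revert heq; decide)

-- the relevant columns (type, values) in input order
def pvCols (ed : List (String × List String)) : List (String × List String) :=
  (ed.filter (fun kv => pvTypeMapping.contains kv.1)).map
    (fun kv => (pvTypeMapping.getD kv.1 "", kv.2))

-- the type list of one IOC: the types of the columns whose value list contains it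
def pvRow (cols : List (String × List String)) (i : String) : List String :=
  (cols.filter (fun c => c.2.contains i)).map (fun c => c.1)

-- the final dict both programs build
def pvSpecD (cols : List (String × List String)) : PySem.Dict String (List String) :=
  PySem.Dict.mk ((PySem.Set.ofList (cols.flatMap Prod.snd)).map (fun i => (i, pvRow cols i)))

-- A's inner-loop step, the type t fixed
def pvAStep (t : String) (m : PySem.Dict String (List String)) (ioc : String) :
    PySem.Dict String (List String) :=
  let m1 := if m.contains ioc then m else m.insert ioc ([] : List String)
  if t ∈ m1.getD ioc [] then m1 else m1.modify ioc [] (fun l => l ++ [t])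

-- the intermediate state of A while the column (t, vs) is being processed: u is the prefix of
-- vs already seen
def pvState (cols : List (String × List String)) (t : String) (u : List String) :
    PySem.Dict String (List String) :=
  PySem.Dict.mk ((PySem.Set.ofList (cols.flatMap Prod.snd ++ u)).map
    (fun i => (i, pvRow cols i ++ if u.contains i then [t] else [])))

theorem pvOfList_append_singleton {α : Type} [BEq α] [LawfulBEq α] (l : List α) (x : α) :
    PySem.Set.ofList (l ++ [x]) =
      if x ∈ l then PySem.Set.ofList l else PySem.Set.ofList l ++ [x] := by
  simp [PySem.Set.ofList_append, PySem.Set.add, PySem.Set.mem_ofList]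

theorem pvRow_subset (cols : List (String × List String)) (i t : String)
    (h : t ∈ pvRow cols i) : t ∈ cols.map Prod.fst := by
  simp only [pvRow, List.mem_map] at h
  obtain ⟨c, hc, rfl⟩ := h
  exact List.mem_map_of_mem (List.mem_of_mem_filter hc)

theorem pvRow_nil (cols : List (String × List String)) (i : String)
    (h : i ∉ cols.flatMap Prod.snd) : pvRow cols i = [] := by
  simp only [pvRow, List.map_eq_nil_iff, List.filter_eq_nil_iff]
  intro c hc
  simp only [List.mem_flatMap] at h
  simp only [List.contains_iff_mem]
  exact fun hm => h ⟨c, hc, hm⟩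

theorem pvState_nil (cols : List (String × List String)) (t : String) :
    pvState cols t [] = pvSpecD cols := by
  simp [pvState, pvSpecD]

theorem pvContains_state (cols : List (String × List String)) (t v : String) (u : List String) :
    (pvState cols t u).contains v = (cols.flatMap Prod.snd ++ u).contains v := by
  rw [Bool.eq_iff_iff]
  simp [pvState, PySem.Dict.contains, List.any_map, List.any_eq_true,
    PySem.Set.mem_ofList]

theorem pvNodup_keys_state (cols : List (String × List String)) (t : String) (u : List String) :
    (pvState cols t u).keys.Nodup := by
  have h : (pvState cols t u).keys
      = (PySem.Set.ofList (cols.flatMap Prod.snd ++ u) : List String) := by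
    simp [pvState, PySem.Dict.keys, List.map_map, Function.comp_def]
  rw [h]
  exact PySem.Set.nodup_ofList _

theorem pvGetD_state (cols : List (String × List String)) (t v : String) (u : List String)
    (h : v ∈ cols.flatMap Prod.snd ++ u) :
    (pvState cols t u).getD v [] = pvRow cols v ++ if u.contains v then [t] else [] := by
  apply PySem.Dict.getD_of_get?_eq_some
  apply PySem.Dict.get?_of_mem_items _ _ (pvNodup_keys_state cols t u)
  simp only [pvState]
  exact List.mem_map_of_mem ((PySem.Set.mem_ofList _ _).mpr h)

theorem pvState_stable (cols : List (String × List String)) (t v : String) (u : List String)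
    (h : v ∈ u) : pvState cols t (u ++ [v]) = pvState cols t u := by
  have hcc : ∀ i : String, (u ++ [v]).contains i = u.contains i := by
    intro i
    rw [Bool.eq_iff_iff]
    simp only [List.contains_iff_mem, List.mem_append, List.mem_singleton]
    constructor
    · rintro (hi | rfl)
      · exact hi
      · exact h
    · exact Or.inl
  unfold pvState
  rw [← List.append_assoc, pvOfList_append_singleton]
  rw [if_pos (by simp [List.mem_append]; exact Or.inr h)]
  congr 1
  apply List.map_congr_left
  intro i _
  rw [hcc i]

theorem pvStep_state (cols : List (String × List String)) (t v : String) (u : List String)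
    (ht : t ∉ cols.map Prod.fst) :
    pvAStep t (pvState cols t u) v = pvState cols t (u ++ [v]) := by
  have hcc : ∀ i : String, i ≠ v → (u ++ [v]).contains i = u.contains i := by
    intro i hne
    rw [Bool.eq_iff_iff]
    simp only [List.contains_iff_mem, List.mem_append, List.mem_singleton]
    constructor
    · rintro (hi | rfl)
      · exact hi
      · exact absurd rfl hne
    · exact Or.inl
  unfold pvAStep
  by_cases hv : v ∈ cols.flatMap Prod.snd ++ u
  · have hc : (pvState cols t u).contains v = true := by
      rw [pvContains_state]; exact List.contains_iff_mem.mpr hv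
    simp only [hc, reduceIte]
    rw [pvGetD_state cols t v u hv]
    by_cases hu : v ∈ u
    · have hcu : u.contains v = true := List.contains_iff_mem.mpr hu
      have hmem : t ∈ pvRow cols v ++ (if u.contains v = true then [t] else []) := by
        rw [hcu]; simp
      rw [if_pos hmem, pvState_stable cols t v u hu]
    · have hcu : u.contains v = false := by
        rw [Bool.eq_iff_iff]; simp [hu]
      have hnt : ¬ t ∈ pvRow cols v ++ (if u.contains v = true then [t] else []) := by
        simp only [hcu, Bool.false_eq_true, if_false, List.append_nil]
        exact fun h => ht (pvRow_subset cols v t h)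
      rw [if_neg hnt]
      have hvl : v ∈ cols.flatMap Prod.snd := by
        rcases List.mem_append.mp hv with h | h
        · exact h
        · exact absurd h hu
      unfold PySem.Dict.modify
      rw [pvGetD_state cols t v u hv]
      simp only [hcu, Bool.false_eq_true, if_false, List.append_nil]
      apply PySem.Dict.ext
      rw [PySem.Dict.items_insert_of_contains _ _ hc]
      show (((PySem.Set.ofList (cols.flatMap Prod.snd ++ u)).map
          (fun i => (i, pvRow cols i ++ if u.contains i = true then [t] else []))).map
          (fun p => if p.1 == v then (v, pvRow cols v ++ [t]) else p))
        = (PySem.Set.ofList (cols.flatMap Prod.snd ++ (u ++ [v]))).map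
          (fun i => (i, pvRow cols i ++ if (u ++ [v]).contains i = true then [t] else []))
      rw [← List.append_assoc, pvOfList_append_singleton,
        if_pos (List.mem_append.mpr (Or.inl hvl)), List.map_map]
      apply List.map_congr_left
      intro i _
      by_cases hiv : i = v
      · subst hiv
        simp
      · have hb : (i == v) = false := by simp [hiv]
        simp only [Function.comp, hb, Bool.false_eq_true, if_false, hcc i hiv]
  · have hc : (pvState cols t u).contains v = false := by
      rw [pvContains_state, Bool.eq_iff_iff]; simp [hv]
    simp only [hc, Bool.false_eq_true, reduceIte]
    rw [PySem.Dict.getD_insert_self]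
    rw [if_neg (by simp)]
    unfold PySem.Dict.modify
    rw [PySem.Dict.getD_insert_self, PySem.Dict.insert_insert_self]
    have hvl : v ∉ cols.flatMap Prod.snd := fun h => hv (List.mem_append.mpr (Or.inl h))
    have hvu : v ∉ u := fun h => hv (List.mem_append.mpr (Or.inr h))
    apply PySem.Dict.ext
    rw [PySem.Dict.items_insert_of_not_contains _ _ hc]
    show ((PySem.Set.ofList (cols.flatMap Prod.snd ++ u)).map
          (fun i => (i, pvRow cols i ++ if u.contains i = true then [t] else []))) ++ [(v, [] ++ [t])]
        = (PySem.Set.ofList (cols.flatMap Prod.snd ++ (u ++ [v]))).map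
          (fun i => (i, pvRow cols i ++ if (u ++ [v]).contains i = true then [t] else []))
    rw [← List.append_assoc, pvOfList_append_singleton, if_neg hv, List.map_append]
    congr 1
    · apply List.map_congr_left
      intro i hi
      have hiv : i ≠ v := by
        intro h
        subst h
        exact hv ((PySem.Set.mem_ofList _ _).mp hi)
      rw [hcc i hiv]
    · simp [pvRow_nil cols v hvl]

theorem pvInner_state (cols : List (String × List String)) (t : String) (vs u : List String)
    (ht : t ∉ cols.map Prod.fst) :
    vs.foldl (pvAStep t) (pvState cols t u) = pvState cols t (u ++ vs) := by
  induction vs generalizing u with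
  | nil => simp
  | cons v vs ih =>
    simp only [List.foldl_cons]
    rw [pvStep_state cols t v u ht, ih (u ++ [v])]
    simp

theorem pvSpec_append (cols : List (String × List String)) (t : String) (vs : List String) :
    pvSpecD (cols ++ [(t, vs)]) = pvState cols t vs := by
  unfold pvSpecD pvState
  have hflat : (cols ++ [(t, vs)]).flatMap Prod.snd = cols.flatMap Prod.snd ++ vs := by simp
  rw [hflat]
  congr 1
  apply List.map_congr_left
  intro i _
  have hrow : pvRow (cols ++ [(t, vs)]) i
      = pvRow cols i ++ if vs.contains i = true then [t] else [] := by
    unfold pvRow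
    rw [List.filter_append, List.map_append]
    congr 1
    by_cases h : i ∈ vs <;> simp [h]
  rw [hrow]

theorem pvA_fold_cols (ed : List (String × List String)) (d : PySem.Dict String (List String)) :
    ed.foldl (fun m kv =>
      if pvTypeMapping.contains kv.1 then
        kv.2.foldl (fun m ioc =>
          let m1 := if m.contains ioc then m else m.insert ioc ([] : List String)
          if pvTypeMapping.getD kv.1 "" ∈ m1.getD ioc [] then m1
          else m1.modify ioc [] (fun l => l ++ [pvTypeMapping.getD kv.1 ""])) m
      else m) d
    = (pvCols ed).foldl (fun m c => c.2.foldl (pvAStep c.1) m) d := by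
  induction ed generalizing d with
  | nil => rfl
  | cons kv ed ih =>
    simp only [List.foldl_cons, pvCols, List.filter_cons]
    by_cases hc : pvTypeMapping.contains kv.1 = true
    · simp only [hc, if_true, List.map_cons, List.foldl_cons]
      rw [ih]
      rfl
    · simp only [hc]
      rw [ih]
      rfl

theorem pvCols_fold_spec (cols : List (String × List String))
    (hnd : (cols.map Prod.fst).Nodup) :
    cols.foldl (fun m c => c.2.foldl (pvAStep c.1) m) PySem.Dict.empty = pvSpecD cols := by
  induction cols using List.reverseRecOn with
  | nil => rfl
  | append_singleton cols c ih =>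
    rw [List.map_append] at hnd
    have ht : c.1 ∉ cols.map Prod.fst := by
      intro hmem
      exact (List.disjoint_of_nodup_append hnd) hmem (by simp)
    rw [List.foldl_append, ih (hnd.sublist (List.sublist_append_left _ _))]
    simp only [List.foldl_cons, List.foldl_nil]
    rw [← pvState_nil cols c.1, pvInner_state cols c.1 c.2 [] ht]
    exact (pvSpec_append cols c.1 c.2).symm

theorem pvTypes_nodup (ed : List (String × List String))
    (hpre : (ed.map Prod.fst).Nodup) : ((pvCols ed).map Prod.fst).Nodup := by
  have hmap : (pvCols ed).map Prod.fst
      = ((ed.filter (fun kv => pvTypeMapping.contains kv.1)).map Prod.fst).map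
          (fun k => pvTypeMapping.getD k "") := by
    unfold pvCols
    rw [List.map_map, List.map_map]
    rfl
  rw [hmap]
  have hknd : ((ed.filter (fun kv => pvTypeMapping.contains kv.1)).map Prod.fst).Nodup :=
    hpre.sublist (List.Sublist.map Prod.fst List.filter_sublist)
  apply List.Nodup.map_on _ hknd
  intro x hx y hy heq
  have hcx : pvTypeMapping.contains x = true := by
    obtain ⟨kv, hkv, rfl⟩ := List.mem_map.mp hx
    exact (List.mem_filter.mp hkv).2
  have hcy : pvTypeMapping.contains y = true := by
    obtain ⟨kv, hkv, rfl⟩ := List.mem_map.mp hy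
    exact (List.mem_filter.mp hkv).2
  exact pvGetD_injOn x y hcx hcy heq

theorem pvB_build (ks : List String) (f : String → List String)
    (d : PySem.Dict String (List String)) (hnd : ks.Nodup)
    (hfresh : ∀ k ∈ ks, d.contains k = false) :
    (ks.foldl (fun d i => d.insert i (f i)) d).items = d.items ++ ks.map (fun i => (i, f i)) := by
  induction ks generalizing d with
  | nil => simp
  | cons k ks ih =>
    simp only [List.foldl_cons, List.map_cons]
    have hk : d.contains k = false := hfresh k (by simp)
    have hstep : (d.insert k (f k)).items = d.items ++ [(k, f k)] :=
      PySem.Dict.items_insert_of_not_contains d _ hk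
    rw [ih (d.insert k (f k)) hnd.of_cons ?_]
    · rw [hstep, List.append_assoc]
      rfl
    · intro k' hk'
      have hne : (k == k') = false := by
        have : k ≠ k' := fun h => (List.nodup_cons.mp hnd).1 (h ▸ hk')
        simp [this]
      simp [PySem.Dict.contains, hstep, List.any_append, hne]
      have := hfresh k' (List.mem_cons_of_mem _ hk')
      simpa [PySem.Dict.contains, List.any_eq_true] using this

theorem pvB_eq_spec (ed : List (String × List String)) :
    get_ioc_types_from_extraction_alt ed = (pvSpecD (pvCols ed)).items := by
  unfold get_ioc_types_from_extraction_alt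
  dsimp only
  have hcol : (ed.filter (fun kv => pvTypeMapping.contains kv.1)).map
        (fun kv => (pvTypeMapping.getD kv.1 "", kv.2, PySem.Set.ofList kv.2))
      = (pvCols ed).map (fun c => (c.1, c.2, PySem.Set.ofList c.2)) := by
    unfold pvCols
    rw [List.map_map]
    rfl
  rw [hcol]
  have horder : ((pvCols ed).map (fun c => (c.1, c.2, PySem.Set.ofList c.2))).flatMap
        (fun c => c.2.1) = (pvCols ed).flatMap Prod.snd := by
    rw [List.flatMap_map]
  rw [horder]
  have hF : ∀ i : String,
      ((((pvCols ed).map (fun c => (c.1, c.2, PySem.Set.ofList c.2))).filter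
          (fun c => c.2.2.contains i)).map (fun c => c.1)) = pvRow (pvCols ed) i := by
    intro i
    rw [List.filter_map, List.map_map]
    unfold pvRow
    congr 1
    apply List.filter_congr
    intro c _
    show (PySem.Set.ofList c.2).contains i = c.2.contains i
    rw [Bool.eq_iff_iff]
    simp [PySem.Set.mem_ofList]
  simp only [hF]
  have hnd : (PySem.List.dedup ((pvCols ed).flatMap Prod.snd)).Nodup :=
    PySem.Set.nodup_ofList _
  rw [pvB_build _ _ _ hnd (fun k _ => rfl)]
  rfl

-- ===== VERDICT (by name: the statement is the Claim_ definition above) =====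
theorem get_ioc_types_from_extraction_spec : Claim_equal_get_ioc_types_from_extraction := by
  intro ed _ hpre
  show get_ioc_types_from_extraction ed = get_ioc_types_from_extraction_alt ed
  rw [pvB_eq_spec]
  show (ed.foldl _ PySem.Dict.empty).items = _
  rw [pvA_fold_cols, pvCols_fold_spec (pvCols ed) (pvTypes_nodup ed hpre)]
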